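-- pv_equiv track=rewrite | github.com/DATAVIOMX/id_check | api/id_check.py | get_id_type
-- ===== SOURCE A (Python) =====
-- def get_id_type(text):
--     """
--     Classifier of IDs based on the text
--     INPUT: text
--     OUTPT: ID type (as a character), None on failure
--     """
--     if text is None:
--         return None
--     text = text.splitlines()
--     if ((any('TO FEDERAL' in mystring for mystring in text)) and
--             ((any('DMEX' in mystring for mystring in text)) or
--              (any('IDMEX' in mystring for mystring in text)) or
--              (any('0MEX' in mystring for mystring in text)))):
--         return 'd'
--     if(any('TO NACIONAL' in mystring for mystring in text) or
--        any('TO NACION' in mystring for mystring in text)):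
--         return 'e'
--     if(any('TO FEDERAL' in mystring for mystring in text) and
--        ((any('DOCUMENTO' in mystring for mystring in text)) or
--         (any('TACHA' in mystring for mystring in text)) or
--         (any('ENMENDADURA' in mystring for mystring in text)) or
--         (any('INTRANSFERIBLE' in mystring for mystring in text)))):
--         return 'a'
--     return None
-- ===== SOURCE B (Python) =====
-- _SUBS = ('TO FEDERAL', 'DMEX', 'IDMEX', '0MEX', 'TO NACIONAL', 'TO NACION',
--          'DOCUMENTO', 'TACHA', 'ENMENDADURA', 'INTRANSFERIBLE')
--
-- def get_id_type(text):
--     if text is None: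
--         return None
--     seen = {s: False for s in _SUBS}
--     for line in text.splitlines():
--         for s in _SUBS:
--             if s in line:
--                 seen[s] = True
--     if seen['TO FEDERAL'] and (seen['DMEX'] or seen['IDMEX'] or seen['0MEX']):
--         return 'd'
--     if seen['TO NACIONAL'] or seen['TO NACION']:
--         return 'e'
--     if seen['TO FEDERAL'] and (seen['DOCUMENTO'] or seen['TACHA'] or
--                                seen['ENMENDADURA'] or seen['INTRANSFERIBLE']):
--         return 'a'
--     return None
-- ===== Notes on version B (the rewrite author's own statement) =====
-- stated objective: alternative
-- what changed: B makes a single pass over the lines recording which of the ten target substrings occur in a presence table, then evaluates the classification against those flags, instead of A's up-to-ten separate any(...) scans over the whole line list.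
import Mathlib
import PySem

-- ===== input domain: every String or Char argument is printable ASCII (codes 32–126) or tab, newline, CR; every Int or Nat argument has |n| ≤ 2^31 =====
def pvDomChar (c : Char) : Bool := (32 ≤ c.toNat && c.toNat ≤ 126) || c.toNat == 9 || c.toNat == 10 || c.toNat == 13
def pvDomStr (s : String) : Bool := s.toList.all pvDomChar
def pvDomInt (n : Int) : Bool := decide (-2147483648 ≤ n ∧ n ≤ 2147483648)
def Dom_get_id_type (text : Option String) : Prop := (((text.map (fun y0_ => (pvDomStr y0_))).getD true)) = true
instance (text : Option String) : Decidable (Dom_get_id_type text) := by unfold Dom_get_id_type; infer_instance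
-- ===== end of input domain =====

-- B replaces A's repeated any(...) scans of the line list by ONE pass that records
-- which target substrings occur, then classifies from that presence table (objective: alternative decomposition).

-- ===== PORT A =====
def get_id_type (text : Option String) : Option String :=
  match text with
  | none => none
  | some t =>
    let lines := PySem.Str.splitlines t
    if (lines.any (fun s => PySem.Str.isIn "TO FEDERAL" s)) &&
        ((lines.any (fun s => PySem.Str.isIn "DMEX" s)) ||
         (lines.any (fun s => PySem.Str.isIn "IDMEX" s)) ||
         (lines.any (fun s => PySem.Str.isIn "0MEX" s))) then
      some "d"
    else if (lines.any (fun s => PySem.Str.isIn "TO NACIONAL" s)) ||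
            (lines.any (fun s => PySem.Str.isIn "TO NACION" s)) then
      some "e"
    else if (lines.any (fun s => PySem.Str.isIn "TO FEDERAL" s)) &&
            ((lines.any (fun s => PySem.Str.isIn "DOCUMENTO" s)) ||
             (lines.any (fun s => PySem.Str.isIn "TACHA" s)) ||
             (lines.any (fun s => PySem.Str.isIn "ENMENDADURA" s)) ||
             (lines.any (fun s => PySem.Str.isIn "INTRANSFERIBLE" s))) then
      some "a"
    else none

-- ===== PORT B =====
-- presence table: one flag per target substring (Source B's dict 'seen')
structure IdFlags where
  toFederal : Bool
  dmex : Bool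
  idmex : Bool
  zmex : Bool
  toNacional : Bool
  toNacion : Bool
  documento : Bool
  tacha : Bool
  enmendadura : Bool
  intransferible : Bool
deriving DecidableEq, Repr

def idFlagsInit : IdFlags := ⟨false, false, false, false, false, false, false, false, false, false⟩

-- one pass over the lines, or-ing each flag (Source B's for-loop over splitlines)
def idScan (lines : List String) (f : IdFlags) : IdFlags :=
  match lines with
  | [] => f
  | l :: ls =>
    idScan ls
      ⟨f.toFederal || PySem.Str.isIn "TO FEDERAL" l,
       f.dmex || PySem.Str.isIn "DMEX" l,
       f.idmex || PySem.Str.isIn "IDMEX" l,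
       f.zmex || PySem.Str.isIn "0MEX" l,
       f.toNacional || PySem.Str.isIn "TO NACIONAL" l,
       f.toNacion || PySem.Str.isIn "TO NACION" l,
       f.documento || PySem.Str.isIn "DOCUMENTO" l,
       f.tacha || PySem.Str.isIn "TACHA" l,
       f.enmendadura || PySem.Str.isIn "ENMENDADURA" l,
       f.intransferible || PySem.Str.isIn "INTRANSFERIBLE" l⟩

def get_id_type_alt (text : Option String) : Option String :=
  match text with
  | none => none
  | some t =>
    let f := idScan (PySem.Str.splitlines t) idFlagsInit
    if f.toFederal && (f.dmex || f.idmex || f.zmex) then some "d"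
    else if f.toNacional || f.toNacion then some "e"
    else if f.toFederal && (f.documento || f.tacha || f.enmendadura || f.intransferible) then some "a"
    else none

-- ===== PRECONDITION & SPEC =====
def Spec_get_id_type (text : Option String) (out : Option String) : Prop := out = get_id_type_alt text
instance (text : Option String) (out : Option String) : Decidable (Spec_get_id_type text out) := by unfold Spec_get_id_type; infer_instance

-- ===== CLAIM (what is proved, stated in full; the proofs are below) =====
def Claim_equal_get_id_type : Prop := ∀ (text : Option String), Dom_get_id_type text → Spec_get_id_type text (get_id_type text)

-- ===== LEMMAS AND PROOFS =====

theorem idScan_eq (lines : List String) (f : IdFlags) :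
    idScan lines f =
      ⟨f.toFederal || lines.any (fun s => PySem.Str.isIn "TO FEDERAL" s),
       f.dmex || lines.any (fun s => PySem.Str.isIn "DMEX" s),
       f.idmex || lines.any (fun s => PySem.Str.isIn "IDMEX" s),
       f.zmex || lines.any (fun s => PySem.Str.isIn "0MEX" s),
       f.toNacional || lines.any (fun s => PySem.Str.isIn "TO NACIONAL" s),
       f.toNacion || lines.any (fun s => PySem.Str.isIn "TO NACION" s),
       f.documento || lines.any (fun s => PySem.Str.isIn "DOCUMENTO" s),
       f.tacha || lines.any (fun s => PySem.Str.isIn "TACHA" s),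
       f.enmendadura || lines.any (fun s => PySem.Str.isIn "ENMENDADURA" s),
       f.intransferible || lines.any (fun s => PySem.Str.isIn "INTRANSFERIBLE" s)⟩ := by
  induction lines generalizing f with
  | nil => simp [idScan]
  | cons l ls ih => simp [idScan, ih, Bool.or_assoc]

-- ===== VERDICT (by name: the statement is the Claim_ definition above) =====
theorem get_id_type_spec : Claim_equal_get_id_type := by
  intro text _
  unfold Spec_get_id_type get_id_type get_id_type_alt
  cases text with
  | none => rfl
  | some t => simp [idScan_eq, idFlagsInit]
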